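-- pv_equiv track=rewrite | github.com/ItsMeMegaMind/HackerRank | Algorithm/Greedy/MArc's Catwalk.py | marcsCakewalk
-- ===== SOURCE A (Python) =====
-- def marcsCakewalk(calorie):
--     n = len(calorie)
--     calorie.sort(reverse=True)
--     out = 0
--     for i in range(n):
--         calc =  (2**i)*calorie[i]
--         out+=calc
--     return out
-- ===== SOURCE B (Python) =====
-- def marcsCakewalk(calorie):
--     calorie.sort(reverse=True)
--     acc = 0
--     for x in reversed(calorie):
--         acc = acc * 2 + x
--     return acc
-- ===== Notes on version B (the rewrite author's own statement) =====
-- stated objective: faster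
-- what changed: Replaces the index-weighted sum of powers of two (2**i * calorie[i] over range(n)) with a Horner-style accumulator fold acc = acc*2 + x over the reversed sorted list, eliminating big-integer exponentiation and indexing.
import Mathlib
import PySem

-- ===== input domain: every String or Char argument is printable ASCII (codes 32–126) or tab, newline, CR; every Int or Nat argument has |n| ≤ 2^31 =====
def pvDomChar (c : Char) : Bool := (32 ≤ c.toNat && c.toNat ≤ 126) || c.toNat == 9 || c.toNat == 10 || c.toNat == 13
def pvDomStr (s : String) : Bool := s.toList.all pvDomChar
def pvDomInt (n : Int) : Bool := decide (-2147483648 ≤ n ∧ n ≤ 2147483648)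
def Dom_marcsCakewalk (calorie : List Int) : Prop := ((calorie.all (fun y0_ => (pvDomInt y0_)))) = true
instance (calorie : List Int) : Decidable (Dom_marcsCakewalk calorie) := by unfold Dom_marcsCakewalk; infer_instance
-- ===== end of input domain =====

-- B replaces the 2**i-weighted indexed sum with a Horner fold acc = acc*2 + x over the
-- reversed sorted list; return values are proved equal (A mutates its argument in place
-- by sorting it, B performs the same in-place sort; the equivalence is about the return value).

-- ===== PORT A =====
def marcsCakewalk (calorie : List Int) : Int :=
  let n : Int := calorie.length
  let calorie := PySem.List.sorted calorie (fun x => x) true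
  (PySem.List.pyRange 0 n 1).foldl
    (fun out i => out + 2 ^ i.toNat * PySem.List.pyGetD calorie i 0) 0

-- ===== PORT B =====
def marcsCakewalk_alt (calorie : List Int) : Int :=
  let calorie := PySem.List.sorted calorie (fun x => x) true
  calorie.reverse.foldl (fun acc x => acc * 2 + x) 0

-- ===== PRECONDITION & SPEC =====
def Spec_marcsCakewalk (calorie : List Int) (out : Int) : Prop := out = marcsCakewalk_alt calorie
instance (calorie : List Int) (out : Int) : Decidable (Spec_marcsCakewalk calorie out) := by unfold Spec_marcsCakewalk; infer_instance

-- ===== CLAIM (what is proved, stated in full; the proofs are below) =====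
def Claim_equal_marcsCakewalk : Prop := ∀ (calorie : List Int), Dom_marcsCakewalk calorie → Spec_marcsCakewalk calorie (marcsCakewalk calorie)

-- ===== LEMMAS AND PROOFS =====

-- the weighted sum ∑ 2^k * s[k] satisfies the head recurrence F (x::t) = x + 2 * F t
theorem weightedSum_cons (x : Int) (t : List Int) :
    ((List.range (x :: t).length).map (fun k => 2 ^ k * (x :: t).getD k 0)).sum
      = x + 2 * ((List.range t.length).map (fun k => 2 ^ k * t.getD k 0)).sum := by
  simp [List.range_succ_eq_map, List.map_map]
  have h : ((fun k => 2 ^ k * (x :: t)[k]?.getD 0) ∘ Nat.succ)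
      = fun k => 2 * (2 ^ k * t[k]?.getD 0) := by
    funext k
    simp [pow_succ]
    ring
  rw [h, List.sum_map_mul_left]

-- Horner over the reverse computes the weighted sum
theorem horner_rev_eq_weightedSum (s : List Int) :
    s.reverse.foldl (fun acc x => acc * 2 + x) 0
      = ((List.range s.length).map (fun k => 2 ^ k * s.getD k 0)).sum := by
  induction s with
  | nil => simp
  | cons x t ih =>
    rw [weightedSum_cons, ← ih]
    simp [List.foldl_append]
    ring

theorem marcsCakewalk_eq_alt (calorie : List Int) :
    marcsCakewalk calorie = marcsCakewalk_alt calorie := by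
  show (PySem.List.pyRange 0 (calorie.length : Int) 1).foldl
      (fun out i => out + 2 ^ i.toNat *
        PySem.List.pyGetD (PySem.List.sorted calorie (fun x => x) true) i 0) 0
    = (PySem.List.sorted calorie (fun x => x) true).reverse.foldl
        (fun acc x => acc * 2 + x) 0
  set s := PySem.List.sorted calorie (fun x => x) true with hs
  have hlen : ((calorie.length : Int)) = ((s.length : Int)) := by
    rw [PySem.List.length_sorted]
  rw [hlen, horner_rev_eq_weightedSum,
    PySem.List.foldl_add (PySem.List.pyRange 0 (s.length : Int) 1)
      (fun i => 2 ^ i.toNat * PySem.List.pyGetD s i 0) 0,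
    PySem.List.pyRange_zero_nat]
  simp [Function.comp_def]

-- ===== VERDICT (by name: the statement is the Claim_ definition above) =====
theorem marcsCakewalk_spec : Claim_equal_marcsCakewalk := by
  intro calorie _
  exact marcsCakewalk_eq_alt calorie
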